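-- pv_equiv track=rewrite | github.com/WnadeyaowuOraganization/.github | scripts/generate_schedule.py | get_priority
-- ===== SOURCE A (Python) =====
-- def get_priority(labels):
--     """获取优先级值，越小越优先"""
--     label_names = [l['name'] for l in labels]
--     # status:test-failed 最优先
--     if 'status:test-failed' in label_names:
--         return (0, 0, 0, 0)
--     # P0 > P1 > P2 > P3
--     for i, p in enumerate(['P0', 'P1', 'P2', 'P3', 'priority/P0', 'priority/P1', 'priority/P2', 'priority/P3']):
--         if p in label_names:
--             return (1, i, 0, 0)
--     return (2, 0, 0, 0)  # 无优先级标签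
-- ===== SOURCE B (Python) =====
-- _RANK = {'P0': 0, 'P1': 1, 'P2': 2, 'P3': 3,
--          'priority/P0': 4, 'priority/P1': 5, 'priority/P2': 6, 'priority/P3': 7}
--
-- def get_priority(labels):
--     """获取优先级值，越小越优先"""
--     best = 8
--     for label in labels:
--         name = label['name']
--         if name == 'status:test-failed':
--             return (0, 0, 0, 0)
--         r = _RANK.get(name)
--         if r is not None and r < best:
--             best = r
--     return (1, best, 0, 0) if best < 8 else (2, 0, 0, 0)
-- ===== Notes on version B (the rewrite author's own statement) =====
-- stated objective: idiomatic
-- what changed: Replaces the candidate-list scan with membership tests (8 passes over the label names) by a rank table and one pass over the labels tracking the minimum rank, with the test-failed check folded into the same pass.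
import Mathlib
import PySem

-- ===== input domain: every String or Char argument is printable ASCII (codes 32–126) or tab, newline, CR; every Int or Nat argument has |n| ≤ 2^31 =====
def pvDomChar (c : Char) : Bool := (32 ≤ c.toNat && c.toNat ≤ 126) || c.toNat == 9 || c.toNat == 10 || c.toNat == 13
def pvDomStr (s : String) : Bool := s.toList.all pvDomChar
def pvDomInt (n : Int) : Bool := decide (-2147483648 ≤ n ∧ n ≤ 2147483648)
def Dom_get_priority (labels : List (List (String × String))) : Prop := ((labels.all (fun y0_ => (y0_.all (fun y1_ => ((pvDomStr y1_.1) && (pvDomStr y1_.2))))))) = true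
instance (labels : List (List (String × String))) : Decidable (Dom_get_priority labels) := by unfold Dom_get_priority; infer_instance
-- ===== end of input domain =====

-- B replaces A's scan over the fixed candidate list (8 membership passes over the label names)
-- by a rank table and a single pass over the labels tracking the minimum rank (objective: idiomatic).

-- ===== PORT A =====
-- the fixed candidate list A enumerates
def pvCands : List String :=
  ["P0", "P1", "P2", "P3", "priority/P0", "priority/P1", "priority/P2", "priority/P3"]

-- the 'for i, p in enumerate(...)' loop with its early return
def pvALoop : List (Int × String) → List String → Int × Int × Int × Int
  | [], _ => (2, 0, 0, 0)
  | (i, p) :: rest, ns => if ns.contains p then (1, i, 0, 0) else pvALoop rest ns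

def get_priority (labels : List (List (String × String))) : Int × Int × Int × Int :=
  let label_names := labels.map (fun l => ((PySem.Dict.mk l).get? "name").getD "")
  if label_names.contains "status:test-failed" then (0, 0, 0, 0)
  else pvALoop (PySem.List.enumerate pvCands) label_names

-- ===== PORT B =====
def pvRank : PySem.Dict String Int :=
  PySem.Dict.mk [("P0", 0), ("P1", 1), ("P2", 2), ("P3", 3),
                 ("priority/P0", 4), ("priority/P1", 5), ("priority/P2", 6), ("priority/P3", 7)]

-- single pass over the labels tracking the minimum rank seen ('best'; 8 = none found)
def pvBLoop : List (List (String × String)) → Int → Int × Int × Int × Int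
  | [], best => if best < 8 then (1, best, 0, 0) else (2, 0, 0, 0)
  | l :: rest, best =>
    let name := ((PySem.Dict.mk l).get? "name").getD ""
    if name = "status:test-failed" then (0, 0, 0, 0)
    else
      match pvRank.get? name with
      | some r => pvBLoop rest (if r < best then r else best)
      | none => pvBLoop rest best

def get_priority_alt (labels : List (List (String × String))) : Int × Int × Int × Int :=
  pvBLoop labels 8

-- ===== PRECONDITION & SPEC =====
-- Pre_ excludes labels lacking a 'name' key, on which the Python raises KeyError.
def Pre_get_priority (labels : List (List (String × String))) : Prop :=
  ∀ l ∈ labels, ((PySem.Dict.mk l).get? "name").isSome = true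
instance (labels : List (List (String × String))) : Decidable (Pre_get_priority labels) := by
  unfold Pre_get_priority; infer_instance

def pvWitness_get_priority : (List (List (String × String))) :=
  [[("name", "P1")], [("name", "bug"), ("color", "red")]]

def Spec_get_priority (labels : List (List (String × String))) (out : Int × Int × Int × Int) : Prop := out = get_priority_alt labels
instance (labels : List (List (String × String))) (out : Int × Int × Int × Int) : Decidable (Spec_get_priority labels out) := by unfold Spec_get_priority; infer_instance

-- ===== CLAIM (what is proved, stated in full; the proofs are below) =====
def Claim_equal_get_priority : Prop := ∀ (labels : List (List (String × String))), Dom_get_priority labels → Pre_get_priority labels → Spec_get_priority labels (get_priority labels)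

-- ===== LEMMAS AND PROOFS =====

-- the label names, as both ports read them
def pvNames (labels : List (List (String × String))) : List String :=
  labels.map (fun l => ((PySem.Dict.mk l).get? "name").getD "")

-- the minimum candidate rank occurring in a list of names (8 if none occurs)
def pvCandMin (ns : List String) : Int :=
  if ns.contains "P0" then 0 else if ns.contains "P1" then 1
  else if ns.contains "P2" then 2 else if ns.contains "P3" then 3
  else if ns.contains "priority/P0" then 4 else if ns.contains "priority/P1" then 5
  else if ns.contains "priority/P2" then 6 else if ns.contains "priority/P3" then 7 else 8

lemma pvCandMin_bounds (ns : List String) : 0 ≤ pvCandMin ns ∧ pvCandMin ns ≤ 8 := by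
  unfold pvCandMin; split_ifs <;> omega

set_option maxHeartbeats 2000000 in
lemma pvCandMin_cons_some (n : String) (ns : List String) (r : Int)
    (h : pvRank.get? n = some r) : pvCandMin (n :: ns) = min r (pvCandMin ns) := by
  simp only [pvRank, PySem.Dict.get?_mk_cons] at h
  by_cases h0 : ("P0" == n) = true
  · obtain rfl : "P0" = n := beq_iff_eq.mp h0
    rw [if_pos h0] at h; obtain rfl : (0 : Int) = r := Option.some.inj h
    simp [pvCandMin]; split_ifs <;> omega
  rw [if_neg h0] at h
  by_cases h1 : ("P1" == n) = true
  · obtain rfl : "P1" = n := beq_iff_eq.mp h1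
    rw [if_pos h1] at h; obtain rfl : (1 : Int) = r := Option.some.inj h
    simp [pvCandMin]; split_ifs <;> omega
  rw [if_neg h1] at h
  by_cases h2 : ("P2" == n) = true
  · obtain rfl : "P2" = n := beq_iff_eq.mp h2
    rw [if_pos h2] at h; obtain rfl : (2 : Int) = r := Option.some.inj h
    simp [pvCandMin]; split_ifs <;> omega
  rw [if_neg h2] at h
  by_cases h3 : ("P3" == n) = true
  · obtain rfl : "P3" = n := beq_iff_eq.mp h3
    rw [if_pos h3] at h; obtain rfl : (3 : Int) = r := Option.some.inj h
    simp [pvCandMin]; split_ifs <;> omega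
  rw [if_neg h3] at h
  by_cases h4 : ("priority/P0" == n) = true
  · obtain rfl : "priority/P0" = n := beq_iff_eq.mp h4
    rw [if_pos h4] at h; obtain rfl : (4 : Int) = r := Option.some.inj h
    simp [pvCandMin]; split_ifs <;> omega
  rw [if_neg h4] at h
  by_cases h5 : ("priority/P1" == n) = true
  · obtain rfl : "priority/P1" = n := beq_iff_eq.mp h5
    rw [if_pos h5] at h; obtain rfl : (5 : Int) = r := Option.some.inj h
    simp [pvCandMin]; split_ifs <;> omega
  rw [if_neg h5] at h
  by_cases h6 : ("priority/P2" == n) = true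
  · obtain rfl : "priority/P2" = n := beq_iff_eq.mp h6
    rw [if_pos h6] at h; obtain rfl : (6 : Int) = r := Option.some.inj h
    simp [pvCandMin]; split_ifs <;> omega
  rw [if_neg h6] at h
  by_cases h7 : ("priority/P3" == n) = true
  · obtain rfl : "priority/P3" = n := beq_iff_eq.mp h7
    rw [if_pos h7] at h; obtain rfl : (7 : Int) = r := Option.some.inj h
    simp [pvCandMin]; split_ifs <;> omega
  rw [if_neg h7] at h
  exact absurd h (by simp [PySem.Dict.get?])

set_option maxHeartbeats 2000000 in
lemma pvCandMin_cons_none (n : String) (ns : List String)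
    (h : pvRank.get? n = none) : pvCandMin (n :: ns) = pvCandMin ns := by
  simp only [pvRank, PySem.Dict.get?_mk_cons] at h
  by_cases h0 : ("P0" == n) = true
  · rw [if_pos h0] at h; simp at h
  rw [if_neg h0] at h
  by_cases h1 : ("P1" == n) = true
  · rw [if_pos h1] at h; simp at h
  rw [if_neg h1] at h
  by_cases h2 : ("P2" == n) = true
  · rw [if_pos h2] at h; simp at h
  rw [if_neg h2] at h
  by_cases h3 : ("P3" == n) = true
  · rw [if_pos h3] at h; simp at h
  rw [if_neg h3] at h
  by_cases h4 : ("priority/P0" == n) = true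
  · rw [if_pos h4] at h; simp at h
  rw [if_neg h4] at h
  by_cases h5 : ("priority/P1" == n) = true
  · rw [if_pos h5] at h; simp at h
  rw [if_neg h5] at h
  by_cases h6 : ("priority/P2" == n) = true
  · rw [if_pos h6] at h; simp at h
  rw [if_neg h6] at h
  by_cases h7 : ("priority/P3" == n) = true
  · rw [if_pos h7] at h; simp at h
  simp only [Bool.not_eq_true] at h0 h1 h2 h3 h4 h5 h6 h7
  simp only [pvCandMin, List.contains_cons, h0, h1, h2, h3, h4, h5, h6, h7, Bool.false_or]

lemma pvBLoop_eq (labels : List (List (String × String))) (best : Int) :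
    pvBLoop labels best =
      (if (pvNames labels).contains "status:test-failed" then (0, 0, 0, 0)
       else if min best (pvCandMin (pvNames labels)) < 8 then
         (1, min best (pvCandMin (pvNames labels)), 0, 0)
       else (2, 0, 0, 0)) := by
  induction labels generalizing best with
  | nil =>
    have h8 : pvCandMin ([] : List String) = 8 := by decide
    simp only [pvBLoop, pvNames, List.map_nil, List.contains_nil, h8]
    split_ifs <;> simp_all
    omega
  | cons l rest ih =>
    simp only [pvBLoop, pvNames, List.map_cons, List.contains_cons]
    by_cases htf : ((PySem.Dict.mk l).get? "name").getD "" = "status:test-failed"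
    · simp [htf]
    · have hne : ("status:test-failed" == ((PySem.Dict.mk l).get? "name").getD "") = false := by
        simp [Ne.symm htf]
      simp only [if_neg htf, hne, Bool.false_or]
      cases hr : pvRank.get? (((PySem.Dict.mk l).get? "name").getD "") with
      | some r =>
        dsimp only
        rw [ih]
        have hc := pvCandMin_cons_some (((PySem.Dict.mk l).get? "name").getD "")
          (pvNames rest) r hr
        simp only [pvNames] at hc
        have e1 : min (if r < best then r else best)
            (pvCandMin (rest.map (fun l => ((PySem.Dict.mk l).get? "name").getD ""))) =
            min best (pvCandMin ((((PySem.Dict.mk l).get? "name").getD "") ::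
              rest.map (fun l => ((PySem.Dict.mk l).get? "name").getD ""))) := by
          rw [hc]; split_ifs <;> omega
        simp only [pvNames, e1]
      | none =>
        dsimp only
        rw [ih]
        have hc := pvCandMin_cons_none (((PySem.Dict.mk l).get? "name").getD "")
          (pvNames rest) hr
        simp only [pvNames] at hc
        simp only [pvNames, hc]

lemma pvALoop_eq (ns : List String) :
    pvALoop (PySem.List.enumerate pvCands) ns =
      (if pvCandMin ns < 8 then (1, pvCandMin ns, 0, 0) else (2, 0, 0, 0)) := by
  have he : PySem.List.enumerate pvCands =
      [(0, "P0"), (1, "P1"), (2, "P2"), (3, "P3"), (4, "priority/P0"),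
       (5, "priority/P1"), (6, "priority/P2"), (7, "priority/P3")] := by decide
  rw [he]
  simp only [pvALoop, pvCandMin]
  split_ifs <;> simp_all

-- ===== VERDICT (by name: the statement is the Claim_ definition above) =====
theorem get_priority_spec : Claim_equal_get_priority := by
  intro labels _ _
  unfold Spec_get_priority get_priority get_priority_alt
  rw [pvBLoop_eq]
  simp only [pvNames]
  have hb := pvCandMin_bounds (labels.map (fun l => ((PySem.Dict.mk l).get? "name").getD ""))
  have hm : min (8 : Int) (pvCandMin (labels.map (fun l => ((PySem.Dict.mk l).get? "name").getD ""))) = pvCandMin (labels.map (fun l => ((PySem.Dict.mk l).get? "name").getD "")) := by omega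
  rw [pvALoop_eq, hm]
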